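-- pv_equiv track=rewrite | github.com/asweigart/programmedpatterns | python/programmedpatterns/__init__.py | vis8
-- ===== SOURCE A (Python) =====
-- def vis8(n):  # DONE
--     """
--     OO  OO   OOO
--         OOO  OOO
--              OOOO
--     Number of Os:
--     2   4    7"""
--     result = ''
--     for i in range(1, n + 1):
--         result += 'O' * (n)
--         if i == n:
--             result += 'O\n'
--         else:
--             result += '\n'
--     return result
-- ===== SOURCE B (Python) =====
-- def vis8(n):
--     if n < 1:
--         return ''
--     return ('O' * n + '\n') * (n - 1) + 'O' * (n + 1) + '\n'
-- ===== Notes on version B (the rewrite author's own statement) =====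
-- stated objective: simpler
-- what changed: Replaces the row-by-row loop with an i==n branch by a closed-form expression: (n-1) repetitions of the ordinary row via string multiplication plus the final longer row.
import Mathlib
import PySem

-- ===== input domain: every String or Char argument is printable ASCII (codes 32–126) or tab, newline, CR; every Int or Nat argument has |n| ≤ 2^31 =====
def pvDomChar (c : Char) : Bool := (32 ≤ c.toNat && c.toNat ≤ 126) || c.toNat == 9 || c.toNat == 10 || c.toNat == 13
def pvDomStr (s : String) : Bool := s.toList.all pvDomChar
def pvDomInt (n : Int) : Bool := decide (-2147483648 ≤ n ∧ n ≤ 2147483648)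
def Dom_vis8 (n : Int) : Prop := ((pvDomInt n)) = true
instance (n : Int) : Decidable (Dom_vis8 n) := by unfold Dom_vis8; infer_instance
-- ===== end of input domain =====

-- B replaces A's row-by-row loop (with its i==n branch) by a closed-form repetition:
-- (n-1) copies of the ordinary row followed by the single longer last row. Objective: simpler.


-- ===== PORT A =====
-- for i in range(1, n+1): result += 'O'*n; result += 'O\n' if i == n else '\n'
def vis8 (n : Int) : String :=
  (PySem.List.pyRange 1 (n + 1) 1).foldl
    (fun result i =>
      result ++ String.ofList (PySem.List.pyRepeat ['O'] n)
             ++ (if i = n then "O\n" else "\n")) ""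

-- ===== PORT B =====
-- if n < 1: ''  else ('O'*n + '\n')*(n-1) + 'O'*(n+1) + '\n'
def vis8_alt (n : Int) : String :=
  if n < 1 then ""
  else
    String.ofList (PySem.List.pyRepeat (PySem.List.pyRepeat ['O'] n ++ ['\n']) (n - 1))
      ++ String.ofList (PySem.List.pyRepeat ['O'] (n + 1)) ++ "\n"

-- ===== PRECONDITION & SPEC =====
def Spec_vis8 (n : Int) (out : String) : Prop := out = vis8_alt n
instance (n : Int) (out : String) : Decidable (Spec_vis8 n out) := by unfold Spec_vis8; infer_instance

-- ===== CLAIM (what is proved, stated in full; the proofs are below) =====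
def Claim_equal_vis8 : Prop := ∀ (n : Int), Dom_vis8 n → Spec_vis8 n (vis8 n)

-- ===== LEMMAS AND PROOFS =====

-- A's loop over rows 1..j (each strictly before row n) appends j ordinary rows.
theorem vis8_fold_lt (n : Int) (j : Nat) (h : (j : Int) < n) (s : String) :
    (PySem.List.pyRange 1 ((j : Int) + 1) 1).foldl
      (fun result i =>
        result ++ String.ofList (PySem.List.pyRepeat ['O'] n)
               ++ (if i = n then "O\n" else "\n")) s
    = s ++ String.ofList
        ((List.replicate j (List.replicate n.toNat 'O' ++ ['\n'])).flatten) := by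
  induction j with
  | zero =>
    rw [show ((0 : Nat) : Int) + 1 = 1 by omega, PySem.List.pyRange_one_eq_nil (by omega)]
    simp
  | succ j ih =>
    have hj : (j : Int) < n := by push_cast at h ⊢; omega
    have hne : ¬ ((j : Int) + 1 = n) := by push_cast at h; omega
    rw [show ((j + 1 : Nat) : Int) + 1 = ((j : Int) + 1) + 1 by push_cast; ring,
      PySem.List.pyRange_one_succ_right (by omega), List.foldl_append, ih hj]
    apply String.toList_inj.mp
    simp [hne, List.replicate_succ' (n := j)]


theorem vis8_spec : Claim_equal_vis8 := by
  intro n _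
  unfold Spec_vis8 vis8 vis8_alt
  by_cases hn : n < 1
  · rw [PySem.List.pyRange_one_eq_nil (by omega), if_pos hn]
    simp
  · rw [if_neg hn]
    obtain ⟨m, hm⟩ : ∃ m : Nat, n = (m : Int) + 1 := ⟨(n - 1).toNat, by omega⟩
    subst hm
    rw [PySem.List.pyRange_one_succ_right (by omega), List.foldl_append,
      vis8_fold_lt _ m (by omega)]
    have h2 : ((m : Int) + 1 - 1) = (m : Int) := by omega
    have h3 : ((m : Int) + 1).toNat = m + 1 := by omega
    have h4 : ((m : Int) + 1 + 1).toNat = m + 2 := by omega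
    apply String.toList_inj.mp
    simp only [PySem.List.pyRepeat, h2, h3, h4,
      String.toList_append, String.toList_ofList]
    simp [List.replicate_succ' (n := m + 1)]
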